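-- pv_equiv track=rewrite | github.com/alhart2015/FantasyBaseball | src/fantasy_baseball/data/yahoo_players.py | merge_position_maps
-- ===== SOURCE A (Python) =====
-- def merge_position_maps(maps: list[dict[str, list[str]]]) -> dict[str, list[str]]:
--     """Merge multiple position maps into one, deduplicating positions."""
--     merged: dict[str, list[str]] = {}
--     for pos_map in maps:
--         for name, positions in pos_map.items():
--             if name not in merged:
--                 merged[name] = []
--             for pos in positions:
--                 if pos not in merged[name]:
--                     merged[name].append(pos)
--     return merged
-- ===== SOURCE B (Python) =====
-- def merge_position_maps(maps: list[dict[str, list[str]]]) -> dict[str, list[str]]: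
--     """Merge multiple position maps into one, deduplicating positions.
--
--     Two phases: first accumulate every position (duplicates included) per name,
--     then deduplicate each list once with dict.fromkeys, preserving first-occurrence order.
--     """
--     merged: dict[str, list[str]] = {}
--     for pos_map in maps:
--         for name, positions in pos_map.items():
--             merged[name] = merged.get(name, []) + positions
--     return {name: list(dict.fromkeys(positions)) for name, positions in merged.items()}
-- ===== Notes on version B (the rewrite author's own statement) =====
-- stated objective: simpler
-- what changed: A deduplicates while inserting (per-position membership test inside the innermost loop of one interleaved pass); B splits this into two phases: first accumulate every position per name with duplicates kept, then one final pass replacing each list by list(dict.fromkeys(...)).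
import Mathlib
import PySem

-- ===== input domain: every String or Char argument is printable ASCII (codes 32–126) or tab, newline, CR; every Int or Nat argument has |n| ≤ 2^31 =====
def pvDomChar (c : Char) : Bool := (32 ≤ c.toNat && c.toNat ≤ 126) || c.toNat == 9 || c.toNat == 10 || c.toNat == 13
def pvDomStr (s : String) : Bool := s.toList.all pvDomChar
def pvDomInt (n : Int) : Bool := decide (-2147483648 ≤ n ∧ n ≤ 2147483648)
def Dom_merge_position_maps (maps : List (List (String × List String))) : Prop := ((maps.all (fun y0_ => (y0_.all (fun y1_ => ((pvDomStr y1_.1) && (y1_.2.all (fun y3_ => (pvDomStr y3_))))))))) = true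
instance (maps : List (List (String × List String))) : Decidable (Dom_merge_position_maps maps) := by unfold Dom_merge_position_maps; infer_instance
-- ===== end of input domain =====

-- B replaces A's interleaved dedup-on-insert loop by two separate phases — accumulate all
-- positions per name, then one dedup pass over the result — for a plainer decomposition.

-- ===== PORT A =====
-- A: one dict, dedup maintained inside the innermost loop (append only if absent).
def merge_position_maps (maps : List (List (String × List String))) : List (String × List String) :=
  (maps.foldl (fun merged pos_map =>
    pos_map.foldl (fun merged nv =>
      let merged := if merged.contains nv.1 then merged else merged.insert nv.1 []
      nv.2.foldl (fun merged pos =>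
        if pos ∈ merged.getD nv.1 [] then merged
        else merged.insert nv.1 (merged.getD nv.1 [] ++ [pos])) merged)
      merged)
    (PySem.Dict.empty)).items

-- ===== PORT B =====
-- B phase 1: accumulate every position (duplicates kept); phase 2: dedup each list once.
def merge_position_maps_alt (maps : List (List (String × List String))) : List (String × List String) :=
  (maps.foldl (fun merged pos_map =>
    pos_map.foldl (fun merged nv =>
      merged.insert nv.1 (merged.getD nv.1 [] ++ nv.2)) merged)
    (PySem.Dict.empty : PySem.Dict String (List String))).items.map
      (fun p => (p.1, PySem.List.dedup p.2))

-- ===== PRECONDITION & SPEC =====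
def Spec_merge_position_maps (maps : List (List (String × List String))) (out : List (String × List String)) : Prop := out = merge_position_maps_alt maps
instance (maps : List (List (String × List String))) (out : List (String × List String)) : Decidable (Spec_merge_position_maps maps out) := by unfold Spec_merge_position_maps; infer_instance

-- ===== CLAIM (what is proved, stated in full; the proofs are below) =====
def Claim_equal_merge_position_maps : Prop := ∀ (maps : List (List (String × List String))), Dom_merge_position_maps maps → Spec_merge_position_maps maps (merge_position_maps maps)

-- ===== LEMMAS AND PROOFS =====

-- map every value through dedup, keeping keys and order
def pvMapD (d : PySem.Dict String (List String)) : PySem.Dict String (List String) :=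
  PySem.Dict.mk (d.items.map (fun p => (p.1, PySem.List.dedup p.2)))

theorem pvGet?_mapD (d : PySem.Dict String (List String)) (k : String) :
    (pvMapD d).get? k = (d.get? k).map PySem.List.dedup := by
  simp [pvMapD, PySem.Dict.get?, List.find?_map, Function.comp_def, Option.map_map]

theorem pvGetD_mapD (d : PySem.Dict String (List String)) (k : String) :
    (pvMapD d).getD k [] = PySem.List.dedup (d.getD k []) := by
  simp [PySem.Dict.getD, pvGet?_mapD]
  cases d.get? k <;> simp [PySem.List.dedup, PySem.Set.ofList, PySem.Set.empty]

theorem pvContains_mapD (d : PySem.Dict String (List String)) (k : String) :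
    (pvMapD d).contains k = d.contains k := by
  simp [pvMapD, PySem.Dict.contains, List.any_map, Function.comp_def]

theorem pvKeys_mapD (d : PySem.Dict String (List String)) :
    (pvMapD d).keys = d.keys := by
  simp [pvMapD, PySem.Dict.keys, List.map_map, Function.comp_def]

theorem pvInsert_mapD (d : PySem.Dict String (List String)) (k : String) (w : List String) :
    pvMapD (d.insert k w) = (pvMapD d).insert k (PySem.List.dedup w) := by
  apply PySem.Dict.ext
  by_cases h : d.contains k = true
  · have h' : (pvMapD d).contains k = true := by rw [pvContains_mapD]; exact h
    show (d.insert k w).items.map _ = _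
    rw [PySem.Dict.items_insert_of_contains d w h,
        PySem.Dict.items_insert_of_contains (pvMapD d) _ h']
    show _ = List.map _ (d.items.map _)
    rw [List.map_map, List.map_map]
    apply List.map_congr_left
    intro p _
    by_cases hk : p.1 = k <;> simp [hk]
  · have h' : (pvMapD d).contains k = false := by
      rw [pvContains_mapD]; simpa using h
    show (d.insert k w).items.map _ = _
    rw [PySem.Dict.items_insert_of_not_contains d w (by simpa using h),
        PySem.Dict.items_insert_of_not_contains (pvMapD d) _ h']
    simp [pvMapD]

-- dedup-on-insert over xs starting from an already-deduped list = dedup of the concatenation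
theorem pvDedup_append (l0 xs : List String) :
    xs.foldl (fun l pos => if pos ∈ l then l else l ++ [pos]) (PySem.List.dedup l0)
      = PySem.List.dedup (l0 ++ xs) := by
  have hadd : (PySem.Set.add : PySem.Set String → String → PySem.Set String)
      = fun l pos => if pos ∈ l then l else l ++ [pos] := by
    funext s x
    simp [PySem.Set.add]
  simp [PySem.List.dedup, PySem.Set.ofList, List.foldl_append, hadd]

theorem pvInsert_getD_self (d : PySem.Dict String (List String)) (k : String)
    (hc : d.contains k = true) (hnd : d.keys.Nodup) :
    d.insert k (d.getD k []) = d := by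
  apply PySem.Dict.ext
  rw [PySem.Dict.items_insert_of_contains d _ hc]
  have : ∀ p ∈ d.items, (if (p.1 == k) = true then (k, d.getD k []) else p) = p := by
    intro p hp
    by_cases h : (p.1 == k) = true
    · have hk : p.1 = k := by simpa using h
      have hmem : (k, p.2) ∈ d.items := by rw [← hk]; exact hp
      have hget := PySem.Dict.getD_of_mem_items d hmem hnd []
      simp [hk, hget, Prod.ext_iff]
    · simp [h]
  simpa using List.map_congr_left this

-- the innermost loop of A moves to a list-level fold at the single key it touches
theorem pvFold_inner (name : String) (positions : List String) :
    ∀ (m : PySem.Dict String (List String)), m.contains name = true → m.keys.Nodup →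
    positions.foldl (fun merged pos =>
        if pos ∈ merged.getD name [] then merged
        else merged.insert name (merged.getD name [] ++ [pos])) m
      = m.insert name (positions.foldl
          (fun l pos => if pos ∈ l then l else l ++ [pos]) (m.getD name [])) := by
  induction positions with
  | nil => intro m hc hnd; simpa using (pvInsert_getD_self m name hc hnd).symm
  | cons pos ps ih =>
    intro m hc hnd
    by_cases h : pos ∈ m.getD name []
    · simpa [h] using ih m hc hnd
    · have h1 := ih (m.insert name (m.getD name [] ++ [pos]))
        (PySem.Dict.contains_insert_self _ _ _)
        (PySem.Dict.nodup_keys_insert _ _ _ hnd)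
      simp only [PySem.Dict.getD_insert_self] at h1
      simp [h, h1, PySem.Dict.insert_insert_self]

-- one (name, positions) pair: A's step on the deduped dict = dedup image of B's step
theorem pvStep (mb : PySem.Dict String (List String)) (hnd : mb.keys.Nodup)
    (name : String) (positions : List String) :
    (positions.foldl (fun merged pos =>
        if pos ∈ merged.getD name [] then merged
        else merged.insert name (merged.getD name [] ++ [pos]))
      (if (pvMapD mb).contains name then pvMapD mb else (pvMapD mb).insert name []))
      = pvMapD (mb.insert name (mb.getD name [] ++ positions)) := by
  have hfold : positions.foldl (fun l pos => if pos ∈ l then l else l ++ [pos]) []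
      = PySem.List.dedup positions := by
    simpa using pvDedup_append [] positions
  by_cases h : mb.contains name = true
  · rw [pvContains_mapD, if_pos h,
      pvFold_inner name positions (pvMapD mb) (by rw [pvContains_mapD]; exact h)
        (by rw [pvKeys_mapD]; exact hnd),
      pvGetD_mapD, pvDedup_append, pvInsert_mapD]
  · have hb : mb.getD name [] = [] :=
      PySem.Dict.getD_of_not_contains mb [] (by simpa using h)
    have h1 : ((pvMapD mb).insert name []).contains name = true :=
      PySem.Dict.contains_insert_self _ _ _
    have h2 : ((pvMapD mb).insert name []).keys.Nodup :=
      PySem.Dict.nodup_keys_insert _ _ _ (by rw [pvKeys_mapD]; exact hnd)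
    rw [pvContains_mapD, if_neg (by simp [h]),
      pvFold_inner name positions _ h1 h2,
      PySem.Dict.getD_insert_self, hfold, hb, List.nil_append,
      pvInsert_mapD, PySem.Dict.insert_insert_self]

-- nodup keys are preserved through B's fold of inserts
theorem pvNodup_foldIns (pm : List (String × List String)) :
    ∀ (mb : PySem.Dict String (List String)), mb.keys.Nodup →
    (pm.foldl (fun merged nv =>
      merged.insert nv.1 (merged.getD nv.1 [] ++ nv.2)) mb).keys.Nodup := by
  induction pm with
  | nil => exact fun _ h => h
  | cons nv r ih =>
    intro mb h
    exact ih _ (PySem.Dict.nodup_keys_insert _ _ _ h)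

-- one pos_map: fold A over a deduped dict = dedup image of fold B
theorem pvStepMap (pm : List (String × List String)) :
    ∀ (mb : PySem.Dict String (List String)), mb.keys.Nodup →
    (pm.foldl (fun merged nv =>
      let merged := if merged.contains nv.1 then merged else merged.insert nv.1 []
      nv.2.foldl (fun merged pos =>
        if pos ∈ merged.getD nv.1 [] then merged
        else merged.insert nv.1 (merged.getD nv.1 [] ++ [pos])) merged) (pvMapD mb))
      = pvMapD (pm.foldl (fun merged nv =>
          merged.insert nv.1 (merged.getD nv.1 [] ++ nv.2)) mb) := by
  induction pm with
  | nil => intro mb _; rfl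
  | cons nv rest ih =>
    intro mb hnd
    have hstep := pvStep mb hnd nv.1 nv.2
    simp only [List.foldl_cons]
    rw [hstep, ih _ (PySem.Dict.nodup_keys_insert _ _ _ hnd)]

theorem pvFold_maps (maps : List (List (String × List String))) :
    ∀ (mb : PySem.Dict String (List String)), mb.keys.Nodup →
    (maps.foldl (fun merged pos_map =>
      pos_map.foldl (fun merged nv =>
        let merged := if merged.contains nv.1 then merged else merged.insert nv.1 []
        nv.2.foldl (fun merged pos =>
          if pos ∈ merged.getD nv.1 [] then merged
          else merged.insert nv.1 (merged.getD nv.1 [] ++ [pos])) merged) merged)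
      (pvMapD mb))
      = pvMapD (maps.foldl (fun merged pos_map =>
          pos_map.foldl (fun merged nv =>
            merged.insert nv.1 (merged.getD nv.1 [] ++ nv.2)) merged) mb) := by
  induction maps with
  | nil => intro mb _; rfl
  | cons pm rest ih =>
    intro mb hnd
    simp only [List.foldl_cons]
    rw [pvStepMap pm mb hnd]
    exact ih _ (pvNodup_foldIns pm mb hnd)

-- ===== VERDICT (by name: the statement is the Claim_ definition above) =====
theorem merge_position_maps_spec : Claim_equal_merge_position_maps := by
  intro maps _
  unfold Spec_merge_position_maps merge_position_maps merge_position_maps_alt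
  have h0 : (PySem.Dict.empty : PySem.Dict String (List String))
      = pvMapD PySem.Dict.empty := rfl
  rw [h0, pvFold_maps maps PySem.Dict.empty (by simp [PySem.Dict.keys, PySem.Dict.empty])]
  rfl
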